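-- pv_equiv track=rewrite | github.com/anniebryan/advent-of-code-19 | aoc_2024/day_9/solution.py | visualize_ix_to_file_id
-- ===== SOURCE A (Python) =====
-- def visualize_ix_to_file_id(ix_to_file_id: dict, total_len: int) -> str:
--     s = []
--     for i in range(total_len):
--         if i in ix_to_file_id:
--             s.append(ix_to_file_id[i])
--         else:
--             s.append(".")
--     return "".join(s)
-- ===== SOURCE B (Python) =====
-- def visualize_ix_to_file_id(ix_to_file_id: dict, total_len: int) -> str:
--     result = ["."] * total_len
--     for k, v in ix_to_file_id.items():
--         if 0 <= k < total_len:
--             result[k] = v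
--     return "".join(result)
-- ===== Notes on version B (the rewrite author's own statement) =====
-- stated objective: alternative
-- what changed: Instead of scanning every index 0..total_len-1 and testing dict membership, B pre-fills a dense list of '.' and scatter-writes only the dict's in-range entries into it.
import Mathlib
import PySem

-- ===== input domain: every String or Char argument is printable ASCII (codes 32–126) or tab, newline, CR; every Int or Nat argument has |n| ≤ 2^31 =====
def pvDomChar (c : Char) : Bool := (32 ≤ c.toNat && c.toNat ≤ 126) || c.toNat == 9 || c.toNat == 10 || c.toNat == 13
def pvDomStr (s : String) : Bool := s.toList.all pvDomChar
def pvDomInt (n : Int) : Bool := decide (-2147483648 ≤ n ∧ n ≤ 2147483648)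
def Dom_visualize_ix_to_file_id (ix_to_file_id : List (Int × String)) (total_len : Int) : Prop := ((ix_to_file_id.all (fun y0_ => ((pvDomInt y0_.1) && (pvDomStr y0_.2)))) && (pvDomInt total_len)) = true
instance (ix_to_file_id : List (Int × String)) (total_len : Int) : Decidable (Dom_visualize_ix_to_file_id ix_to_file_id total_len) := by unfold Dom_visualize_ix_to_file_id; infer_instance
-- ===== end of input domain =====

-- B pre-fills a dense list of "." and scatter-writes only the dict's in-range entries,
-- instead of scanning every index 0..total_len-1 and testing membership (objective: alternative decomposition).

-- ===== PORT A =====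
-- s = []; for i in range(total_len): s.append(d[i] if i in d else "."); return "".join(s)
def visualize_ix_to_file_id (ix_to_file_id : List (Int × String)) (total_len : Int) : String :=
  let d := PySem.Dict.ofList ix_to_file_id
  let s := (PySem.List.pyRange 0 total_len 1).foldl
    (fun s i => if d.contains i then s ++ [d.getD i "."] else s ++ ["."]) []
  PySem.Str.join "" s

-- ===== PORT B =====
-- result = ["."]*total_len; for k, v in d.items(): if 0 <= k < total_len: result[k] = v; return "".join(result)
def visualize_ix_to_file_id_alt (ix_to_file_id : List (Int × String)) (total_len : Int) : String :=
  let d := PySem.Dict.ofList ix_to_file_id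
  let result := List.replicate total_len.toNat "."
  let result := d.items.foldl
    (fun r kv => if 0 ≤ kv.1 ∧ kv.1 < total_len then r.set kv.1.toNat kv.2 else r) result
  PySem.Str.join "" result

-- ===== PRECONDITION & SPEC =====
def Spec_visualize_ix_to_file_id (ix_to_file_id : List (Int × String)) (total_len : Int) (out : String) : Prop := out = visualize_ix_to_file_id_alt ix_to_file_id total_len
instance (ix_to_file_id : List (Int × String)) (total_len : Int) (out : String) : Decidable (Spec_visualize_ix_to_file_id ix_to_file_id total_len out) := by unfold Spec_visualize_ix_to_file_id; infer_instance

-- ===== CLAIM (what is proved, stated in full; the proofs are below) =====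
def Claim_equal_visualize_ix_to_file_id : Prop := ∀ (ix_to_file_id : List (Int × String)) (total_len : Int), Dom_visualize_ix_to_file_id ix_to_file_id total_len → Spec_visualize_ix_to_file_id ix_to_file_id total_len (visualize_ix_to_file_id ix_to_file_id total_len)

-- ===== LEMMAS AND PROOFS =====

-- B's scatter loop preserves the length of the buffer.
lemma pv_lenB (n : Int) (l : List (Int × String)) (r : List String) :
    (l.foldl (fun r kv => if 0 ≤ kv.1 ∧ kv.1 < n then r.set kv.1.toNat kv.2 else r) r).length
      = r.length := by
  induction l generalizing r with
  | nil => rfl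
  | cons kv t ih =>
    rw [List.foldl_cons, ih]
    split <;> simp

-- If no pair of l has key j, B's scatter loop leaves position j untouched.
lemma pv_noKeyB (n : Int) (l : List (Int × String)) (j : Nat)
    (h : ∀ kv ∈ l, kv.1 ≠ (j : Int)) (r : List String) :
    (l.foldl (fun r kv => if 0 ≤ kv.1 ∧ kv.1 < n then r.set kv.1.toNat kv.2 else r) r)[j]?
      = r[j]? := by
  induction l generalizing r with
  | nil => rfl
  | cons kv t ih =>
    rw [List.foldl_cons, ih (fun x hx => h x (List.mem_cons_of_mem _ hx))]
    split
    · rename_i hc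
      have hk := h kv (by simp)
      exact List.getElem?_set_ne (by omega)
    · rfl

-- Position j (in range) of B's buffer after the scatter loop: the first pair with key j, else untouched.
lemma pv_foldB (n : Int) (l : List (Int × String)) (hnd : (l.map Prod.fst).Nodup)
    (r : List String) (j : Nat) (hlen : r.length = n.toNat) (hj : j < n.toNat) :
    (l.foldl (fun r kv => if 0 ≤ kv.1 ∧ kv.1 < n then r.set kv.1.toNat kv.2 else r) r)[j]?
      = match l.find? (fun kv => kv.1 == (j : Int)) with
        | some kv => some kv.2
        | none => r[j]? := by
  induction l generalizing r with
  | nil => rfl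
  | cons kv t ih =>
    rw [List.foldl_cons, List.find?_cons]
    simp only [List.map_cons, List.nodup_cons] at hnd
    by_cases hk : kv.1 = (j : Int)
    · have hb : (kv.1 == (j : Int)) = true := by simp [hk]
      rw [hb]
      have hnot : ∀ x ∈ t, x.1 ≠ (j : Int) := by
        intro x hx hxj
        exact hnd.1 (List.mem_map.mpr ⟨x, hx, by omega⟩)
      rw [pv_noKeyB n t j hnot]
      have hcond : 0 ≤ kv.1 ∧ kv.1 < n := by
        constructor <;> omega
      rw [if_pos hcond]
      have hkj : kv.1.toNat = j := by omega
      rw [hkj]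
      exact List.getElem?_set_self (by omega)
    · have hb : (kv.1 == (j : Int)) = false := by simp [hk]
      rw [hb]
      simp only
      by_cases hc : 0 ≤ kv.1 ∧ kv.1 < n
      · rw [if_pos hc, ih hnd.2 _ (by rw [List.length_set]; exact hlen)]
        have hne : kv.1.toNat ≠ j := by omega
        cases hfind : t.find? (fun kv => kv.1 == (j : Int)) with
        | some p => rfl
        | none => exact List.getElem?_set_ne hne
      · rw [if_neg hc, ih hnd.2 _ hlen]

-- Dict.get? is the first match in the items list.
lemma pv_get?_eq_find? (l : List (Int × String)) (j : Int) :
    (PySem.Dict.mk l).get? j = (l.find? (fun kv => kv.1 == j)).map Prod.snd := by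
  induction l with
  | nil => rfl
  | cons kv t ih =>
    obtain ⟨k, v⟩ := kv
    rw [PySem.Dict.get?_mk_cons, List.find?_cons]
    by_cases hk : k = j
    · simp [hk]
    · have hb : (k == j) = false := by simp [hk]
      rw [hb, ih]
      simp

theorem visualize_ix_to_file_id_spec : Claim_equal_visualize_ix_to_file_id := by
  intro l n _
  unfold Spec_visualize_ix_to_file_id visualize_ix_to_file_id visualize_ix_to_file_id_alt
  simp only []
  congr 1
  -- rewrite A's loop as a map over the range
  rw [show (fun (s : List String) i => if (PySem.Dict.ofList l).contains i
        then s ++ [(PySem.Dict.ofList l).getD i "."] else s ++ ["."])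
      = (fun s i => s ++ [if (PySem.Dict.ofList l).contains i
        then (PySem.Dict.ofList l).getD i "." else "."]) from by
    funext s i; split <;> rfl]
  rw [PySem.List.foldl_append_singleton_eq_map, List.nil_append]
  apply List.ext_getElem?
  intro j
  have hnd : ((PySem.Dict.ofList l).items.map Prod.fst).Nodup :=
    PySem.Dict.nodup_keys_ofList l
  have hlenA : ((PySem.List.pyRange 0 n 1).map (fun i =>
      if (PySem.Dict.ofList l).contains i then (PySem.Dict.ofList l).getD i "." else ".")).length
      = n.toNat := by
    simp [PySem.List.length_pyRange_one]
  by_cases hj : j < n.toNat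
  · -- A side
    rw [List.getElem?_map]
    have hrj : (PySem.List.pyRange 0 n 1)[j]? = some ((0 : Int) + j) := by
      rw [PySem.List.getElem?_pyRange_one]
      simp [hj]
    rw [hrj]
    -- B side
    rw [pv_foldB n _ hnd _ j (by simp) hj]
    have hd : PySem.Dict.mk (PySem.Dict.ofList l).items = PySem.Dict.ofList l := by
      cases h : PySem.Dict.ofList l; rfl
    have hget := pv_get?_eq_find? (PySem.Dict.ofList l).items (j : Int)
    rw [hd] at hget
    cases hfind : (PySem.Dict.ofList l).items.find? (fun kv => kv.1 == ((j : Nat) : Int)) with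
    | some kv =>
      rw [hfind] at hget
      simp only [Option.map_some] at hget
      simp [PySem.Dict.contains_eq_isSome_get?, hget, PySem.Dict.getD_eq_get?_getD]
    | none =>
      rw [hfind] at hget
      simp only [Option.map_none] at hget
      simp [PySem.Dict.contains_eq_isSome_get?, hget, hj]
  · rw [List.getElem?_eq_none (by rw [hlenA]; omega), List.getElem?_eq_none (by rw [pv_lenB]; simp; omega)]
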